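-- pv_equiv track=rewrite | github.com/IgorBarbashov/algorithms_and_data_structures | yandex_algorithms_tranings/homework_1_2_review/02_05_championship.py | highestPlace
-- ===== SOURCE A (Python) =====
-- def highestPlace(seq):
--     winScore = max(seq)
--     isWinnerPassed = False
--     bestScore = -1
--     for i in range(len(seq) - 1):
--         if seq[i] % 10 == 5 and isWinnerPassed and seq[i + 1] < seq[i] and seq[i] > bestScore:
--             bestScore = seq[i]
--         if seq[i] == winScore:
--             isWinnerPassed = True
--     if bestScore == -1:
--         return 0
--
--     count = 0
--     for n in seq:
--         if n > bestScore:
--             count += 1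
--     return count + 1
-- ===== SOURCE B (Python) =====
-- def highestPlace(seq):
--     winScore = max(seq)
--     w = seq.index(winScore)
--     bestScore = -1
--     for i in range(w + 1, len(seq) - 1):
--         if seq[i] % 10 == 5 and seq[i + 1] < seq[i]:
--             bestScore = max(bestScore, seq[i])
--     if bestScore == -1:
--         return 0
--     return sorted(seq, reverse=True).index(bestScore) + 1
-- ===== Notes on version B (the rewrite author's own statement) =====
-- stated objective: alternative
-- what changed: B replaces A's boolean winner-passed flag and best-so-far comparison loop by locating the first winner with max/index and scanning only the indices after it with a running max, and replaces A's counting loop by indexing the candidate score in a descending sort.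
import Mathlib
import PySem

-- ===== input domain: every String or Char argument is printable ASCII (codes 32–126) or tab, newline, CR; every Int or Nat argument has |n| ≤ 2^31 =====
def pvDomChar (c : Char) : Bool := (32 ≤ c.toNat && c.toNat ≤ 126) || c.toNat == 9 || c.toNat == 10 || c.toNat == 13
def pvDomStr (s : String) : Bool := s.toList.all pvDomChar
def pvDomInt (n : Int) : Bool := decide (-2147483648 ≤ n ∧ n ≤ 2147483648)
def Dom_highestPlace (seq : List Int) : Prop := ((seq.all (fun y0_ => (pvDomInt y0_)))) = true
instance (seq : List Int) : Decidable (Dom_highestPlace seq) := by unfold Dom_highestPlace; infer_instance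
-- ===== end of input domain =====

-- B locates the first winner via max/index and takes a running max of the qualifying scores
-- after it, then ranks that score by its position in a descending sort (objective: alternative).

-- ===== PORT A =====
-- A's loop body (the two statements of the for-loop, checked in order: the flag is updated after the score check)
def pvStepA (seq : List Int) (winScore : Int) (st : Bool × Int) (i : Int) : Bool × Int :=
  (if PySem.List.pyGetD seq i 0 = winScore then true else st.1,
   if PySem.Int.mod (PySem.List.pyGetD seq i 0) 10 = 5 ∧ st.1 = true ∧
      PySem.List.pyGetD seq (i + 1) 0 < PySem.List.pyGetD seq i 0 ∧
      PySem.List.pyGetD seq i 0 > st.2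
   then PySem.List.pyGetD seq i 0 else st.2)

-- every index touched by range(len(seq)-1) is in range, so pyGetD's default is never read
def highestPlace (seq : List Int) : Int :=
  let winScore : Int := (PySem.List.max? seq (fun x => x)).getD 0  -- max(seq); Pre_ excludes [] (ValueError)
  let st : Bool × Int :=
    (PySem.List.pyRange 0 (PySem.List.len seq - 1) 1).foldl (pvStepA seq winScore) (false, -1)
  if st.2 = -1 then 0
  else (seq.foldl (fun c n => if n > st.2 then c + 1 else c) (0 : Int)) + 1

-- ===== PORT B =====
-- B's loop body
def pvStepB (seq : List Int) (b : Int) (i : Int) : Int :=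
  if PySem.Int.mod (PySem.List.pyGetD seq i 0) 10 = 5 ∧
     PySem.List.pyGetD seq (i + 1) 0 < PySem.List.pyGetD seq i 0
  then max b (PySem.List.pyGetD seq i 0) else b

def highestPlace_alt (seq : List Int) : Int :=
  let winScore : Int := (PySem.List.max? seq (fun x => x)).getD 0  -- max(seq); Pre_ excludes [] (ValueError)
  let w : Int := ((PySem.List.index? seq winScore).getD 0 : Nat)   -- winScore ∈ seq, so .index never raises
  let best : Int :=
    (PySem.List.pyRange (w + 1) (PySem.List.len seq - 1) 1).foldl (pvStepB seq) (-1)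
  if best = -1 then 0
  else ((PySem.List.index? (PySem.List.sorted seq (fun x => x) true) best).getD 0 : Nat) + 1

-- ===== PRECONDITION & SPEC =====
-- Pre_ excludes only the empty list, on which A's max(seq) raises ValueError.
def Pre_highestPlace (seq : List Int) : Prop := seq ≠ []
instance (seq : List Int) : Decidable (Pre_highestPlace seq) := by unfold Pre_highestPlace; infer_instance
def pvWitness_highestPlace : List Int := [3, 25, 15, 4]
def Spec_highestPlace (seq : List Int) (out : Int) : Prop := out = highestPlace_alt seq
instance (seq : List Int) (out : Int) : Decidable (Spec_highestPlace seq out) := by unfold Spec_highestPlace; infer_instance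

-- ===== CLAIM (what is proved, stated in full; the proofs are below) =====
def Claim_equal_highestPlace : Prop := ∀ (seq : List Int), Dom_highestPlace seq → Pre_highestPlace seq → Spec_highestPlace seq (highestPlace seq)

-- ===== LEMMAS AND PROOFS =====

-- before the winner is reached, A's flag stays false and bestScore stays -1
theorem pvStepA_false (seq : List Int) (winScore : Int) (L : List Int)
    (h : ∀ i ∈ L, PySem.List.pyGetD seq i 0 ≠ winScore) :
    L.foldl (pvStepA seq winScore) (false, -1) = (false, -1) := by
  induction L with
  | nil => rfl
  | cons a t ih =>
      have ha := h a (by simp)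
      simp only [List.foldl_cons, pvStepA, if_neg ha]
      simp only [show ((false : Bool) = true) = False by simp, false_and, and_false, if_false]
      exact ih (fun i hi => h i (by simp [hi]))

-- once the flag is true it stays true, and the second component is the flag-free loop
theorem pvStepA_true (seq : List Int) (winScore : Int) (L : List Int) (b : Int) :
    L.foldl (pvStepA seq winScore) (true, b) =
      (true, L.foldl (fun b i =>
        if PySem.Int.mod (PySem.List.pyGetD seq i 0) 10 = 5 ∧
           PySem.List.pyGetD seq (i + 1) 0 < PySem.List.pyGetD seq i 0 ∧
           PySem.List.pyGetD seq i 0 > b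
        then PySem.List.pyGetD seq i 0 else b) b) := by
  induction L generalizing b with
  | nil => rfl
  | cons a t ih =>
      simp only [List.foldl_cons, pvStepA]
      rw [show (if PySem.List.pyGetD seq a 0 = winScore then true else true) = true by simp]
      simp only [true_and]
      exact ih _

-- A's conditional update ("take it if strictly better") is B's running max
theorem pvStepAB (seq : List Int) (L : List Int) (b : Int) :
    L.foldl (fun b i =>
        if PySem.Int.mod (PySem.List.pyGetD seq i 0) 10 = 5 ∧
           PySem.List.pyGetD seq (i + 1) 0 < PySem.List.pyGetD seq i 0 ∧
           PySem.List.pyGetD seq i 0 > b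
        then PySem.List.pyGetD seq i 0 else b) b = L.foldl (pvStepB seq) b := by
  apply PySem.List.foldl_congr_mem
  intro acc x _
  unfold pvStepB
  by_cases h : PySem.Int.mod (PySem.List.pyGetD seq x 0) 10 = 5 ∧
      PySem.List.pyGetD seq (x + 1) 0 < PySem.List.pyGetD seq x 0
  · rw [if_pos h]
    by_cases h2 : PySem.List.pyGetD seq x 0 > acc
    · rw [if_pos ⟨h.1, h.2, h2⟩, max_eq_right (le_of_lt h2)]
    · rw [if_neg (by tauto), max_eq_left (by omega)]
  · rw [if_neg h, if_neg (by tauto)]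

-- B's running max is -1 or an element of seq
theorem pvBest_mem (seq : List Int) (L : List Int) (b : Int)
    (h : ∀ i ∈ L, PySem.List.pyGetD seq i 0 ∈ seq) :
    L.foldl (pvStepB seq) b = b ∨ L.foldl (pvStepB seq) b ∈ seq := by
  induction L generalizing b with
  | nil => simp
  | cons a t ih =>
      simp only [List.foldl_cons]
      have hmem : PySem.List.pyGetD seq a 0 ∈ seq := h a (by simp)
      rcases ih (pvStepB seq b a) (fun i hi => h i (by simp [hi])) with ht | ht
      · rw [ht]
        unfold pvStepB
        split_ifs with h1
        · rcases max_choice b (PySem.List.pyGetD seq a 0) with hm | hm <;> rw [hm]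
          · exact Or.inl rfl
          · exact Or.inr hmem
        · exact Or.inl rfl
      · exact Or.inr ht

-- in a weakly descending list, the index of a present value is the number of strictly greater elements
theorem pvDescIndex (v : Int) (ys : List Int)
    (hp : ys.Pairwise (fun a b => b ≤ a)) (hv : v ∈ ys) :
    PySem.List.index? ys v = some (ys.countP (fun x => decide (v < x))) := by
  induction ys with
  | nil => simp at hv
  | cons y t ih =>
      rcases List.pairwise_cons.mp hp with ⟨hy, ht⟩
      by_cases hyv : y = v
      · subst hyv
        have hcnt : t.countP (fun x => decide (y < x)) = 0 :=
          List.countP_eq_zero.mpr (fun x hx => by simpa using not_lt.mpr (hy x hx))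
        rw [PySem.List.index?_cons_self y t]
        simp [hcnt]
      · have hvt : v ∈ t := by
          rcases List.mem_cons.mp hv with h | h
          · exact absurd h.symm hyv
          · exact h
        have hlt : v < y := lt_of_le_of_ne (hy v hvt) (fun h => hyv h.symm)
        rw [PySem.List.index?_cons_of_ne t hyv, ih ht hvt]
        simp [hlt]

-- ===== VERDICT (by name: the statement is the Claim_ definition above) =====
theorem highestPlace_spec : Claim_equal_highestPlace := by
  intro seq _ hpre
  unfold Spec_highestPlace highestPlace highestPlace_alt
  obtain ⟨m, hm⟩ : ∃ m, PySem.List.max? seq (fun x => x) = some m := by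
    cases hmax : PySem.List.max? seq (fun x => x) with
    | none => exact absurd ((PySem.List.max?_eq_none_iff seq _).mp hmax) hpre
    | some m => exact ⟨m, rfl⟩
  have hmmem : m ∈ seq := PySem.List.max?_mem hm
  obtain ⟨wn, hw⟩ : ∃ wn, PySem.List.index? seq m = some wn := by
    cases hidx : PySem.List.index? seq m with
    | none => exact absurd ((PySem.List.index?_eq_none_iff seq m).mp hidx) (by simp [hmmem])
    | some k => exact ⟨k, rfl⟩
  obtain ⟨hwlt, hwv, hwfirst⟩ := PySem.List.getElem_of_index?_eq_some hw
  simp only [hm, hw, Option.getD_some, PySem.List.len_eq]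
  have hvne : ∀ i : Int, 0 ≤ i → i < (wn : Int) → PySem.List.pyGetD seq i 0 ≠ m := by
    intro i h0 hi
    rw [PySem.List.pyGetD_eq_getElem seq 0 h0 (by omega)]
    exact hwfirst i.toNat (by omega)
  by_cases hcase : (wn : Int) + 1 ≤ (seq.length : Int) - 1
  · -- winner is not among the last two positions: both loops run
    rw [PySem.List.pyRange_one_append 0 ((wn : Int) + 1) ((seq.length : Int) - 1)
          (by omega) hcase,
        PySem.List.pyRange_one_append 0 (wn : Int) ((wn : Int) + 1) (by omega) (by omega),
        PySem.List.pyRange_one_singleton, List.foldl_append, List.foldl_append,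
        pvStepA_false seq m _ (fun i hi => by
          rcases (PySem.List.mem_pyRange_one).mp hi with ⟨h0, h1⟩
          exact hvne i h0 h1)]
    have hgetwn : PySem.List.pyGetD seq (wn : Int) 0 = m := by
      rw [PySem.List.pyGetD_eq_getElem seq 0 (by omega) (by omega)]
      simpa using hwv
    have hstep : pvStepA seq m (false, -1) (wn : Int) = (true, -1) := by
      simp [pvStepA, hgetwn]
    rw [List.foldl_cons, hstep, List.foldl_nil, pvStepA_true, pvStepAB]
    set best := (PySem.List.pyRange ((wn : Int) + 1) ((seq.length : Int) - 1) 1).foldl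
        (pvStepB seq) (-1) with hbest
    by_cases hb : best = -1
    · simp [hb]
    · simp only [if_neg hb]
      have hbmem : best ∈ seq := by
        rcases pvBest_mem seq (PySem.List.pyRange ((wn : Int) + 1) ((seq.length : Int) - 1) 1)
            (-1) (fun i hi => by
            rcases (PySem.List.mem_pyRange_one).mp hi with ⟨h0, h1⟩
            rw [PySem.List.pyGetD_eq_getElem seq 0 (by omega) (by omega)]
            exact List.getElem_mem _) with h | h
        · exact absurd (hbest.trans h) hb
        · rw [hbest]; exact h
      have hysmem : best ∈ PySem.List.sorted seq (fun x => x) true :=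
        (PySem.List.mem_sorted seq (fun x => x) true best).mpr hbmem
      have hyspw : (PySem.List.sorted seq (fun x => x) true).Pairwise (fun a b => b ≤ a) :=
        PySem.List.sorted_pairwise_rev seq (fun x => x)
      rw [pvDescIndex best _ hyspw hysmem, Option.getD_some]
      rw [PySem.List.foldl_ite_add_one (fun n => n > best)]
      have hperm : (PySem.List.sorted seq (fun x => x) true).countP (fun x => decide (best < x))
          = seq.countP (fun x => decide (best < x)) :=
        (PySem.List.sorted_perm seq (fun x => x) true).countP_eq _
      rw [hperm]
      norm_num
  · -- winner is the last or second-to-last scanned position: no candidate, both return 0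
    rw [show PySem.List.pyRange ((wn : Int) + 1) ((seq.length : Int) - 1) 1 = [] from
          PySem.List.pyRange_one_eq_nil (by omega),
        pvStepA_false seq m _ (fun i hi => by
          rcases (PySem.List.mem_pyRange_one).mp hi with ⟨h0, h1⟩
          exact hvne i h0 (by omega))]
    simp
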